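-- pv_equiv track=rewrite | github.com/TubeSound/NWO | technical.py | detect_trend_term
-- ===== SOURCE A (Python) =====
-- def detect_trend_term(vector):
--     long = []
--     n = len(vector)
--     begin = None
--     for i in range(n):
--         if begin is None:
--             if vector[i] > 0:
--                 begin = i
--         else:
--             if vector[i] <= 0:
--                 long.append([begin, i - 1])
--                 begin = None
--     short = []
--     begin = None
--     for i in range(n):
--         if begin is None:
--             if vector[i] < 0:
--                 begin = i
--         else:
--             if vector[i] >= 0:
--                 short.append([begin, i - 1])
--                 begin = None
--     return long, short
-- ===== SOURCE B (Python) =====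
-- def detect_trend_term(vector):
--     # One pass over enumerate(vector), classifying each element by sign and
--     # closing the current run whenever the sign changes; a run still open at
--     # the end of the vector is never emitted (matching A).
--     long, short = [], []
--     start = 0
--     cur = None  # sign of the current run (1, 0, -1), None before the first element
--     for i, x in enumerate(vector):
--         s = 1 if x > 0 else (-1 if x < 0 else 0)
--         if s != cur:
--             if cur == 1:
--                 long.append([start, i - 1])
--             elif cur == -1:
--                 short.append([start, i - 1])
--             start, cur = i, s
--     return long, short
-- ===== Notes on version B (the rewrite author's own statement) =====
-- stated objective: simpler
-- what changed: Replaces A's two separate index loops (one for positive runs, one for negative runs) by a single pass over enumerate(vector) that classifies each element by sign and closes the current run on every sign change, building both lists at once.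
import Mathlib
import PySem

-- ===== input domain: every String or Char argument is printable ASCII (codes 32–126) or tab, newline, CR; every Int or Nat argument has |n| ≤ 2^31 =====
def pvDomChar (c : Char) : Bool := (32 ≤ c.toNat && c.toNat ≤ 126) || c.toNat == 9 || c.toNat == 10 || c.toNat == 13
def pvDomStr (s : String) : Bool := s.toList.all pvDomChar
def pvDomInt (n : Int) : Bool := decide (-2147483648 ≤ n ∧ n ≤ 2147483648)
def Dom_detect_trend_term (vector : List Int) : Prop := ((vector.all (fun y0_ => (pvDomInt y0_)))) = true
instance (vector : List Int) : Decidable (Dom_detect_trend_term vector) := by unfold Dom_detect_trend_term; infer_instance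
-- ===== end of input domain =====

-- B replaces A's two index loops by one pass over enumerate(vector) closing runs on sign change; proved equal on all inputs.

-- ===== PORT A =====
-- Literal port of A: two foldl's over range(n); vector[i] is ported with pyGetD
-- (exact here since every i drawn from range(n) is in range, so Python never raises).
def detect_trend_term (vector : List Int) : List (List Int) × List (List Int) :=
  let n : Int := (vector.length : Int)
  let p1 := (PySem.List.pyRange 0 n 1).foldl
    (fun (st : List (List Int) × Option Int) i =>
      match st.2 with
      | none => if PySem.List.pyGetD vector i 0 > 0 then (st.1, some i) else st
      | some b => if PySem.List.pyGetD vector i 0 ≤ 0 then (st.1 ++ [[b, i - 1]], none) else st)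
    ([], none)
  let p2 := (PySem.List.pyRange 0 n 1).foldl
    (fun (st : List (List Int) × Option Int) i =>
      match st.2 with
      | none => if PySem.List.pyGetD vector i 0 < 0 then (st.1, some i) else st
      | some b => if PySem.List.pyGetD vector i 0 ≥ 0 then (st.1 ++ [[b, i - 1]], none) else st)
    ([], none)
  (p1.1, p2.1)

-- ===== PORT B =====
-- Literal port of Source B: one foldl over enumerate(vector) with state (long, short, start, cur).
def detect_trend_term_alt (vector : List Int) : List (List Int) × List (List Int) :=
  let st := (PySem.List.enumerate vector 0).foldl
    (fun (st : List (List Int) × List (List Int) × Int × Option Int) p =>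
      let s : Int := if p.2 > 0 then 1 else if p.2 < 0 then -1 else 0
      if some s ≠ st.2.2.2 then
        let long := if st.2.2.2 = some 1 then st.1 ++ [[st.2.2.1, p.1 - 1]] else st.1
        let short := if st.2.2.2 = some (-1) then st.2.1 ++ [[st.2.2.1, p.1 - 1]] else st.2.1
        (long, short, p.1, some s)
      else st)
    ([], [], 0, none)
  (st.1, st.2.1)

-- ===== PRECONDITION & SPEC =====
def Spec_detect_trend_term (vector : List Int) (out : List (List Int) × List (List Int)) : Prop := out = detect_trend_term_alt vector
instance (vector : List Int) (out : List (List Int) × List (List Int)) : Decidable (Spec_detect_trend_term vector out) := by unfold Spec_detect_trend_term; infer_instance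

-- ===== CLAIM (what is proved, stated in full; the proofs are below) =====
def Claim_equal_detect_trend_term : Prop := ∀ (vector : List Int), Dom_detect_trend_term vector → Spec_detect_trend_term vector (detect_trend_term vector)

-- ===== LEMMAS AND PROOFS =====

-- Reference recursion: the runs of elements satisfying c, processed front to back,
-- closing the open run [b, k-1] when c fails; a run open at the end is dropped.
def pvRuns (c : Int → Bool) : List Int → Int → Option Int → List (List Int)
  | [], _, _ => []
  | x :: xs, k, none => if c x then pvRuns c xs (k + 1) (some k) else pvRuns c xs (k + 1) none
  | x :: xs, k, some b => if c x then pvRuns c xs (k + 1) (some b) else [b, k - 1] :: pvRuns c xs (k + 1) none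

-- generic A-side loop over a range of indices, parameterised by the condition
def pvAStep (c : Int → Bool) (vector : List Int) (st : List (List Int) × Option Int) (i : Int) : List (List Int) × Option Int :=
  match st.2 with
  | none => if c (PySem.List.pyGetD vector i 0) then (st.1, some i) else st
  | some b => if c (PySem.List.pyGetD vector i 0) then st else (st.1 ++ [[b, i - 1]], none)

theorem pvAfold (c : Int → Bool) (vector : List Int) :
    ∀ (xs : List Int) (k : Nat), vector.drop k = xs →
    ∀ (L : List (List Int)) (b : Option Int),
      ((PySem.List.pyRange k (vector.length : Int) 1).foldl (pvAStep c vector) (L, b)).1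
        = L ++ pvRuns c xs (k : Int) b := by
  intro xs
  induction xs with
  | nil =>
    intro k hk L b
    have hlen : vector.length ≤ k := by
      by_contra h
      have := List.drop_eq_nil_iff.mp hk
      omega
    rw [PySem.List.pyRange_one_eq_nil (by exact_mod_cast hlen)]
    simp [pvRuns]
  | cons x xs ih =>
    intro k hk L b
    have hklt : k < vector.length := by
      by_contra h
      rw [List.drop_eq_nil_of_le (by omega)] at hk
      simp at hk
    have hx : vector[k]'hklt = x := by
      have := List.getElem_drop (xs := vector) (i := k) (j := 0) (h := by simp [hk])
      simpa [hk] using this.symm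
    have hdrop : vector.drop (k + 1) = xs := by
      have h2 : (vector.drop k).drop 1 = vector.drop (k + 1) := by
        rw [List.drop_drop]
      rw [← h2, hk]
      simp
    have hget : PySem.List.pyGetD vector (k : Int) 0 = x := by
      rw [PySem.List.pyGetD_natCast]
      simp [List.getD, hklt, hx]
    rw [PySem.List.pyRange_one_cons (by exact_mod_cast hklt)]
    rw [List.foldl_cons]
    have hcast : ((k : Int) + 1) = ((k + 1 : Nat) : Int) := by push_cast; ring
    cases b with
    | none =>
      by_cases hc : c x
      all_goals
        simp only [pvAStep, hget, hc]
        rw [hcast, ih (k + 1) hdrop]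
        simp only [pvRuns, hc, ← hcast]
        simp
    | some b0 =>
      by_cases hc : c x
      all_goals
        simp only [pvAStep, hget, hc]
        rw [hcast, ih (k + 1) hdrop]
        simp only [pvRuns, hc, ← hcast]
        simp

-- B's step and its fold, related to pvRuns for both signs at once
def pvBStep (st : List (List Int) × List (List Int) × Int × Option Int) (p : Int × Int) :
    List (List Int) × List (List Int) × Int × Option Int :=
  let s : Int := if p.2 > 0 then 1 else if p.2 < 0 then -1 else 0
  if some s ≠ st.2.2.2 then
    let long := if st.2.2.2 = some 1 then st.1 ++ [[st.2.2.1, p.1 - 1]] else st.1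
    let short := if st.2.2.2 = some (-1) then st.2.1 ++ [[st.2.2.1, p.1 - 1]] else st.2.1
    (long, short, p.1, some s)
  else st

theorem pvBfold :
    ∀ (xs : List Int) (k : Int) (L S : List (List Int)) (start : Int) (sg : Option Int),
      (((PySem.List.enumerate xs k).foldl pvBStep (L, S, start, sg)).1
          = L ++ pvRuns (fun x => decide (0 < x)) xs k (if sg = some 1 then some start else none))
      ∧ (((PySem.List.enumerate xs k).foldl pvBStep (L, S, start, sg)).2.1
          = S ++ pvRuns (fun x => decide (x < 0)) xs k (if sg = some (-1) then some start else none)) := by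
  intro xs
  induction xs with
  | nil => intro k L S start sg; simp [PySem.List.enumerate_nil, pvRuns]
  | cons x xs ih =>
    intro k L S start sg
    rw [PySem.List.enumerate_cons, List.foldl_cons]
    set s : Int := if x > 0 then 1 else if x < 0 then -1 else 0 with hs
    by_cases hne : some s ≠ sg
    · have hstep : pvBStep (L, S, start, sg) (k, x)
          = ((if sg = some 1 then L ++ [[start, k - 1]] else L),
             (if sg = some (-1) then S ++ [[start, k - 1]] else S), k, some s) := by
        simp [pvBStep, hne, ← hs]
      rw [hstep]
      obtain ⟨ih1, ih2⟩ := ih (k + 1) (if sg = some 1 then L ++ [[start, k - 1]] else L)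
        (if sg = some (-1) then S ++ [[start, k - 1]] else S) k (some s)
      constructor
      · rw [ih1]
        by_cases h1 : sg = some 1
        · have hsne1 : s ≠ 1 := by intro h; exact hne (by rw [h, h1])
          have hxle : ¬ (0 < x) := by
            intro h; apply hsne1; simp [hs, h]
          simp [pvRuns, h1, hxle, hsne1]
        · by_cases hpos : 0 < x
          · have hs1 : s = 1 := by simp [hs, hpos]
            simp [pvRuns, h1, hpos, hs1]
          · have hsne1 : s ≠ 1 := by
              simp only [hs]; split_ifs <;> omega
            simp [pvRuns, h1, hpos, hsne1]
      · rw [ih2]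
        by_cases h1 : sg = some (-1)
        · have hsne1 : s ≠ -1 := by intro h; exact hne (by rw [h, h1])
          have hxge : ¬ (x < 0) := by
            intro h
            apply hsne1
            have hnp : ¬ (0 < x) := by omega
            simp [hs, h, hnp]
          simp [pvRuns, h1, hxge, hsne1]
        · by_cases hneg : x < 0
          · have hs1 : s = -1 := by
              have hnp : ¬ (0 < x) := by omega
              simp [hs, hneg, hnp]
            simp [pvRuns, h1, hneg, hs1]
          · have hsne1 : s ≠ -1 := by
              simp only [hs]; split_ifs <;> omega
            simp [pvRuns, h1, hneg, hsne1]
    · rw [not_not] at hne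
      have hstep : pvBStep (L, S, start, sg) (k, x) = (L, S, start, sg) := by
        simp [pvBStep, ← hs, hne]
      rw [hstep]
      obtain ⟨ih1, ih2⟩ := ih (k + 1) L S start sg
      constructor
      · rw [ih1]
        by_cases h1 : sg = some 1
        · have hs1 : s = 1 := by
            have := hne; rw [h1] at this; exact Option.some_injective _ this
          have hpos : 0 < x := by
            by_contra h
            simp only [hs] at hs1
            split_ifs at hs1 <;> omega
          simp [pvRuns, h1, hpos]
        · have hsne1 : s ≠ 1 := by
            intro h; apply h1; rw [← hne, h]
          have hnp : ¬ (0 < x) := by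
            intro h; apply hsne1; simp [hs, h]
          simp [pvRuns, h1, hnp]
      · rw [ih2]
        by_cases h1 : sg = some (-1)
        · have hs1 : s = -1 := by
            have := hne; rw [h1] at this; exact Option.some_injective _ this
          have hneg : x < 0 := by
            by_contra h
            simp only [hs] at hs1
            split_ifs at hs1 <;> omega
          simp [pvRuns, h1, hneg]
        · have hsne1 : s ≠ -1 := by
            intro h; apply h1; rw [← hne, h]
          have hnn : ¬ (x < 0) := by
            intro h
            apply hsne1
            have hnp : ¬ (0 < x) := by omega
            simp [hs, h, hnp]
          simp [pvRuns, h1, hnn]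

theorem pvA_eq (vector : List Int) :
    detect_trend_term vector
      = (pvRuns (fun x => decide (0 < x)) vector 0 none,
         pvRuns (fun x => decide (x < 0)) vector 0 none) := by
  unfold detect_trend_term
  have h1 : (fun (st : List (List Int) × Option Int) i =>
      match st.2 with
      | none => if PySem.List.pyGetD vector i 0 > 0 then (st.1, some i) else st
      | some b => if PySem.List.pyGetD vector i 0 ≤ 0 then (st.1 ++ [[b, i - 1]], none) else st)
      = pvAStep (fun x => decide (0 < x)) vector := by
    funext st i
    cases hst : st.2 with
    | none => simp [pvAStep, hst]
    | some b =>
      simp only [pvAStep, hst, decide_eq_true_eq]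
      by_cases h : 0 < PySem.List.pyGetD vector i 0
      · rw [if_neg (by omega), if_pos h]
      · rw [if_pos (by omega), if_neg h]
  have h2 : (fun (st : List (List Int) × Option Int) i =>
      match st.2 with
      | none => if PySem.List.pyGetD vector i 0 < 0 then (st.1, some i) else st
      | some b => if PySem.List.pyGetD vector i 0 ≥ 0 then (st.1 ++ [[b, i - 1]], none) else st)
      = pvAStep (fun x => decide (x < 0)) vector := by
    funext st i
    cases hst : st.2 with
    | none => simp [pvAStep, hst]
    | some b =>
      simp only [pvAStep, hst, decide_eq_true_eq]
      by_cases h : PySem.List.pyGetD vector i 0 < 0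
      · rw [if_neg (by omega), if_pos h]
      · rw [if_pos (by omega), if_neg h]
  simp only [h1, h2]
  have e1 := pvAfold (fun x => decide (0 < x)) vector vector 0 (by simp) [] none
  have e2 := pvAfold (fun x => decide (x < 0)) vector vector 0 (by simp) [] none
  simp only [Nat.cast_zero] at e1 e2
  rw [e1, e2]
  simp

theorem pvB_eq (vector : List Int) :
    detect_trend_term_alt vector
      = (pvRuns (fun x => decide (0 < x)) vector 0 none,
         pvRuns (fun x => decide (x < 0)) vector 0 none) := by
  unfold detect_trend_term_alt
  have hstep : (fun (st : List (List Int) × List (List Int) × Int × Option Int) (p : Int × Int) =>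
      let s : Int := if p.2 > 0 then 1 else if p.2 < 0 then -1 else 0
      if some s ≠ st.2.2.2 then
        let long := if st.2.2.2 = some 1 then st.1 ++ [[st.2.2.1, p.1 - 1]] else st.1
        let short := if st.2.2.2 = some (-1) then st.2.1 ++ [[st.2.2.1, p.1 - 1]] else st.2.1
        (long, short, p.1, some s)
      else st) = pvBStep := by
    funext st p; rfl
  rw [hstep]
  obtain ⟨e1, e2⟩ := pvBfold vector 0 [] [] 0 none
  simp at e1 e2
  exact Prod.ext e1 e2

-- ===== VERDICT (by name: the statement is the Claim_ definition above) =====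
theorem detect_trend_term_spec : Claim_equal_detect_trend_term := by
  intro vector _
  unfold Spec_detect_trend_term
  rw [pvA_eq, pvB_eq]
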